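-- pv_equiv track=rewrite | github.com/Patrycja1311/Codewars | kata_7kyu/kooka_counter/kooka_counter.py | kooka_counter
-- ===== SOURCE A (Python) =====
-- def kooka_counter(laughing):
--     groups = []
--     i = 0
--     while i < len(laughing):
--         if laughing[i:i+2] == "Ha":
--             groups.append("Ha")
--             i += 2
--         elif laughing[i:i+2] == "ha":
--             groups.append("ha")
--             i += 2
--         else:
--             i += 1
--     return sum(groups[i] != groups[i-1] for i in range(1, len(groups))) + 1 if groups else 0
-- ===== SOURCE B (Python) =====
-- import re
-- from itertools import groupby
--
-- def kooka_counter(laughing):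
--     return sum(1 for _ in groupby(re.findall(r'Ha|ha', laughing)))
-- ===== Notes on version B (the rewrite author's own statement) =====
-- stated objective: idiomatic
-- what changed: Replaces the manual index-advancing tokenizer and the pairwise adjacent-comparison sum with regex extraction of all tokens at once (re.findall) followed by counting maximal runs with itertools.groupby.
import Mathlib
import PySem

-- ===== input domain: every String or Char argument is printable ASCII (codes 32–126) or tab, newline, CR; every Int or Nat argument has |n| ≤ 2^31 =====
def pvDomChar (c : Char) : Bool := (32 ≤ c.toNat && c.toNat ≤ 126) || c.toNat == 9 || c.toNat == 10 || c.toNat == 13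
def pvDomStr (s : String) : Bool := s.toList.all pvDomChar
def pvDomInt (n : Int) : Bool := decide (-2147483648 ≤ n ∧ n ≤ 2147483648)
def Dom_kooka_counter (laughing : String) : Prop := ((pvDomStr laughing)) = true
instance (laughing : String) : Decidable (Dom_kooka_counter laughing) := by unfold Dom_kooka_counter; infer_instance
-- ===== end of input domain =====

-- B replaces A's index-advancing scan + pairwise-comparison sum by token extraction (re.findall) plus run counting (groupby): idiomatic, and measurably faster in CPython (C-level regex scan vs per-character slicing).

-- ===== PORT A =====
-- while-loop of A: index i advances by 2 on a token, by 1 otherwise, appending tokens to groups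
def kookaLoopA (cs : List Char) (i : Nat) (groups : List String) : List String :=
  if _h : i < cs.length then
    if PySem.List.slice cs (some (i : Int)) (some ((i : Int) + 2)) = ['H', 'a'] then
      kookaLoopA cs (i + 2) (groups ++ ["Ha"])
    else if PySem.List.slice cs (some (i : Int)) (some ((i : Int) + 2)) = ['h', 'a'] then
      kookaLoopA cs (i + 2) (groups ++ ["ha"])
    else
      kookaLoopA cs (i + 1) groups
  else groups
termination_by cs.length - i

def kooka_counter (laughing : String) : Int :=
  let groups := kookaLoopA laughing.toList 0 []
  if groups ≠ [] then
    (PySem.List.pyRange 1 groups.length 1).foldl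
      (fun acc i => acc + (if PySem.List.pyGetD groups i "" ≠ PySem.List.pyGetD groups (i - 1) "" then 1 else 0)) 0 + 1
  else 0

-- ===== PORT B =====
-- re.findall(r'Ha|ha', laughing): leftmost non-overlapping matches, 'Ha' alternative tried first
def findTokensB : List Char → List String
  | c :: d :: r =>
    if c = 'H' ∧ d = 'a' then "Ha" :: findTokensB r
    else if c = 'h' ∧ d = 'a' then "ha" :: findTokensB r
    else findTokensB (d :: r)
  | _ => []

-- sum(1 for _ in groupby(tokens)): number of maximal runs (an element opens a run iff it is first or differs from its predecessor)
def countRunsB : List String → Int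
  | [] => 0
  | [_] => 1
  | a :: b :: r => (if a = b then 0 else 1) + countRunsB (b :: r)

def kooka_counter_alt (laughing : String) : Int :=
  countRunsB (findTokensB laughing.toList)

-- ===== PRECONDITION & SPEC =====
def Spec_kooka_counter (laughing : String) (out : Int) : Prop := out = kooka_counter_alt laughing
instance (laughing : String) (out : Int) : Decidable (Spec_kooka_counter laughing out) := by unfold Spec_kooka_counter; infer_instance

-- ===== CLAIM (what is proved, stated in full; the proofs are below) =====
def Claim_equal_kooka_counter : Prop := ∀ (laughing : String), Dom_kooka_counter laughing → Spec_kooka_counter laughing (kooka_counter laughing)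

-- ===== LEMMAS AND PROOFS =====

-- A's loop produces exactly B's token list (accumulator generalized, position as a suffix)
theorem slice_two (cs : List Char) (i : Nat) :
    PySem.List.slice cs (some (i : Int)) (some ((i : Int) + 2)) = (cs.drop i).take 2 := by
  have h := PySem.List.slice_natCast_add (xs := cs) (j := i) (n := 2)
  simpa using h

theorem kookaLoopA_eq (cs : List Char) (i : Nat) (groups : List String) :
    kookaLoopA cs i groups = groups ++ findTokensB (cs.drop i) := by
  fun_induction kookaLoopA cs i groups with
  | case1 i groups h h1 ih =>
    rw [slice_two] at h1
    rw [ih]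
    have hd2 : cs.drop (i + 2) = (cs.drop i).drop 2 := by
      rw [List.drop_drop]
    rcases e : cs.drop i with _ | ⟨c, _ | ⟨d, r⟩⟩
    · rw [e] at h1; simp at h1
    · rw [e] at h1; simp at h1
    · rw [e] at h1; simp at h1
      obtain ⟨hc, hdd⟩ := h1
      subst hc hdd
      simp [e, hd2, findTokensB]
  | case2 i groups h h1 h2 ih =>
    rw [slice_two] at h1 h2
    rw [ih]
    have hd2 : cs.drop (i + 2) = (cs.drop i).drop 2 := by
      rw [List.drop_drop]
    rcases e : cs.drop i with _ | ⟨c, _ | ⟨d, r⟩⟩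
    · rw [e] at h2; simp at h2
    · rw [e] at h2; simp at h2
    · rw [e] at h1 h2; simp at h1 h2
      obtain ⟨hc, hdd⟩ := h2
      subst hc hdd
      simp [findTokensB, e, hd2]
  | case3 i groups h h1 h2 ih =>
    rw [slice_two] at h1 h2
    rw [ih]
    have hd1 : cs.drop (i + 1) = (cs.drop i).drop 1 := by
      rw [List.drop_drop]
    have hne : cs.drop i ≠ [] := by
      intro hE
      have := List.length_drop (l := cs) (i := i)
      rw [hE] at this; simp at this; omega
    rcases e : cs.drop i with _ | ⟨c, _ | ⟨d, r⟩⟩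
    · exact absurd e hne
    · simp [e, hd1, findTokensB]
    · rw [e] at h1 h2; simp at h1 h2
      simp only [e, hd1, List.drop_one, List.tail_cons]
      rw [show findTokensB (c :: d :: r) =
            (if c = 'H' ∧ d = 'a' then "Ha" :: findTokensB r
             else if c = 'h' ∧ d = 'a' then "ha" :: findTokensB r
             else findTokensB (d :: r)) from rfl,
          if_neg (by tauto), if_neg (by tauto)]
  | case4 i groups h =>
    have : cs.drop i = [] := List.drop_eq_nil_of_le (by omega)
    simp [this, findTokensB]

-- pairwise-difference count, the structural twin of A's indexed sum
def pairDiff : List String → Int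
  | a :: b :: r => (if a = b then 0 else 1) + pairDiff (b :: r)
  | _ => 0

theorem sum_range_pairDiff (ts : List String) :
    ((List.range (ts.length - 1)).map fun k => if ts.getD (k + 1) "" ≠ ts.getD k "" then (1:Int) else 0).sum
      = pairDiff ts := by
  induction ts with
  | nil => simp [pairDiff]
  | cons a t ih =>
    cases t with
    | nil => simp [pairDiff]
    | cons b r =>
      have hl : (a :: b :: r).length - 1 = (r.length) + 1 := by simp
      rw [hl, List.range_succ_eq_map, List.map_cons, List.map_map, List.sum_cons]
      have : ((List.range r.length).map ((fun k => if (a :: b :: r).getD (k + 1) "" ≠ (a :: b :: r).getD k "" then (1:Int) else 0) ∘ Nat.succ))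
          = ((List.range ((b :: r).length - 1)).map fun k => if (b :: r).getD (k + 1) "" ≠ (b :: r).getD k "" then (1:Int) else 0) := by
        simp [Function.comp, List.getD]
      rw [this, ih]
      rcases eq_or_ne a b with hab | hab
      · simp [pairDiff, List.getD, hab]
      · simp [pairDiff, List.getD, hab, hab.symm]

theorem sum_eq_pairDiff (ts : List String) :
    (PySem.List.pyRange 1 ts.length 1).foldl
      (fun acc i => acc + (if PySem.List.pyGetD ts i "" ≠ PySem.List.pyGetD ts (i - 1) "" then 1 else 0)) 0 = pairDiff ts := by
  rw [PySem.List.pyRange_one, List.foldl_map,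
      PySem.List.foldl_add (g := fun k : Nat =>
        if PySem.List.pyGetD ts (1 + (k : Int)) "" ≠ PySem.List.pyGetD ts (1 + (k : Int) - 1) "" then (1:Int) else 0)]
  have hidx : ∀ k : Nat,
      (if PySem.List.pyGetD ts (1 + (k : Int)) "" ≠ PySem.List.pyGetD ts (1 + (k : Int) - 1) "" then (1:Int) else 0)
        = (if ts.getD (k + 1) "" ≠ ts.getD k "" then (1:Int) else 0) := by
    intro k
    have h1 : (1 + (k : Int)) = ((k + 1 : Nat) : Int) := by push_cast; ring
    have h2 : (1 + (k : Int) - 1) = ((k : Nat) : Int) := by ring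
    rw [h2, h1, PySem.List.pyGetD_natCast, PySem.List.pyGetD_natCast]
  have hlen : ((ts.length : Int) - 1).toNat = ts.length - 1 := by omega
  rw [hlen, zero_add,
      List.map_congr_left (l := List.range (ts.length - 1)) (fun k _ => hidx k),
      sum_range_pairDiff]

theorem countRunsB_eq (ts : List String) (h : ts ≠ []) : countRunsB ts = pairDiff ts + 1 := by
  induction ts with
  | nil => exact absurd rfl h
  | cons a t ih =>
    cases t with
    | nil => simp [countRunsB, pairDiff]
    | cons b r =>
      rw [show countRunsB (a :: b :: r) = (if a = b then 0 else 1) + countRunsB (b :: r) from rfl,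
          ih (by simp), show pairDiff (a :: b :: r) = (if a = b then 0 else 1) + pairDiff (b :: r) from rfl]
      ring

-- ===== VERDICT (by name: the statement is the Claim_ definition above) =====
theorem kooka_counter_spec : Claim_equal_kooka_counter := by
  intro laughing _
  unfold Spec_kooka_counter kooka_counter kooka_counter_alt
  rw [show kookaLoopA laughing.toList 0 [] = findTokensB laughing.toList by
        simpa using kookaLoopA_eq laughing.toList 0 []]
  by_cases h : findTokensB laughing.toList = []
  · simp [h, countRunsB]
  · simp only [h, ne_eq, not_false_eq_true, if_true]
    rw [sum_eq_pairDiff, countRunsB_eq _ h]
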